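-- pv_equiv track=rewrite | github.com/MrBrantCode/unitest_baseline | mut_generate/mist_train_taco/taco_6754/solution.py | check_string_pattern
-- ===== SOURCE A (Python) =====
-- def check_string_pattern(s: str) -> str:
--     curved = 'QRUOPJGDSCB'
--     ctr = 0
--     for char in s:
--         if char in curved:
--             ctr += 1
--     if ctr == 0 or ctr == len(s):
--         return 'YES'
--     else:
--         return 'NO'
-- ===== SOURCE B (Python) =====
-- def check_string_pattern(s: str) -> str:
--     curved = 'QRUOPJGDSCB'
--     flags = {c in curved for c in s}
--     return 'YES' if len(flags) <= 1 else 'NO'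
-- ===== Notes on version B (the rewrite author's own statement) =====
-- stated objective: simpler
-- what changed: Replaces the counter-vs-length bookkeeping with the set of distinct membership outcomes, answering positively iff at most one distinct flag occurs.
import Mathlib
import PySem

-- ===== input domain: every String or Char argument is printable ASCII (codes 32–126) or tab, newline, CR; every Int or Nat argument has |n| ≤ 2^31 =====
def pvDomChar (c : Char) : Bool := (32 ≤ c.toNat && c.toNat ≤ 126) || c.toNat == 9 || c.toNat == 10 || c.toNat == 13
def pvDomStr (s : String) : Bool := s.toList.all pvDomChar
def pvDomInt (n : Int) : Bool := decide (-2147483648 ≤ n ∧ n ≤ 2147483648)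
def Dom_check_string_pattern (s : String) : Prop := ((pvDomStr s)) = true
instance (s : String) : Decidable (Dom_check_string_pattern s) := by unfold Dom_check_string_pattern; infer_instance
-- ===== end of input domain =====

-- B replaces A's counter-vs-length bookkeeping by the set of distinct membership flags; objective: simpler.

-- ===== PORT A =====
def check_string_pattern (s : String) : String :=
  let curved : List Char := "QRUOPJGDSCB".toList
  let ctr : Nat := s.toList.foldl (fun ctr ch => if curved.contains ch then ctr + 1 else ctr) 0
  if ctr = 0 ∨ ctr = s.toList.length then "YES" else "NO"

-- ===== PORT B =====
def check_string_pattern_alt (s : String) : String :=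
  let curved : List Char := "QRUOPJGDSCB".toList
  let flags : PySem.Set Bool := PySem.Set.ofList (s.toList.map (fun c => curved.contains c))
  if flags.length ≤ 1 then "YES" else "NO"

-- ===== PRECONDITION & SPEC =====
def Spec_check_string_pattern (s : String) (out : String) : Prop := out = check_string_pattern_alt s
instance (s : String) (out : String) : Decidable (Spec_check_string_pattern s out) := by unfold Spec_check_string_pattern; infer_instance

-- ===== CLAIM (what is proved, stated in full; the proofs are below) =====
def Claim_equal_check_string_pattern : Prop := ∀ (s : String), Dom_check_string_pattern s → Spec_check_string_pattern s (check_string_pattern s)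

-- ===== LEMMAS AND PROOFS =====

-- A's counter is a countP.
theorem pv_ctr_eq_countP (l : List Char) (p : List Char) :
    l.foldl (fun ctr ch => if p.contains ch then ctr + 1 else ctr) 0 = l.countP (fun ch => p.contains ch) := by
  -- Nat-accumulator variant of PySem.List.foldl_count_if (which is stated for an Int accumulator)
  have h : ∀ n : Nat, l.foldl (fun ctr ch => if p.contains ch then ctr + 1 else ctr) n
      = n + l.countP (fun ch => p.contains ch) := by
    induction l with
    | nil => simp
    | cons a t ih =>
      intro n
      simp only [List.foldl_cons, List.countP_cons, ih]
      split_ifs <;> simp_all; omega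
  simpa using h 0

-- A nodup Bool list of length ≥ 2 contains both booleans.
theorem pv_nodup_bool_two {fl : List Bool} (hn : fl.Nodup) (hl : 2 ≤ fl.length) :
    true ∈ fl ∧ false ∈ fl := by
  match fl, hn with
  | a :: b :: _, hn =>
    have hab : a ≠ b := by
      intro h; exact (List.nodup_cons.mp hn).1 (h ▸ List.mem_cons_self ..)
    cases a <;> cases b <;> simp_all
  | [], _ => simp at hl
  | [_], _ => simp at hl

-- The distinct flag set is small iff the flags never disagree.
theorem pv_flags_le_one (l : List Bool) :
    (PySem.Set.ofList l).length ≤ 1 ↔ ¬ (true ∈ l ∧ false ∈ l) := by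
  constructor
  · rintro h ⟨ht, hf⟩
    have ht' : true ∈ PySem.Set.ofList l := (PySem.Set.mem_ofList ..).mpr ht
    have hf' : false ∈ PySem.Set.ofList l := (PySem.Set.mem_ofList ..).mpr hf
    interval_cases hlen : (PySem.Set.ofList l).length
    · simp [List.length_eq_zero_iff.mp hlen] at ht'
    · obtain ⟨a, ha⟩ := List.length_eq_one_iff.mp hlen
      rw [ha] at ht' hf'; simp_all
  · intro h
    by_contra hlen
    have := pv_nodup_bool_two (PySem.Set.nodup_ofList l) (by omega)
    exact h ⟨(PySem.Set.mem_ofList ..).mp this.1, (PySem.Set.mem_ofList ..).mp this.2⟩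

-- ===== VERDICT (by name: the statement is the Claim_ definition above) =====
theorem check_string_pattern_spec : Claim_equal_check_string_pattern := by
  intro s _
  unfold Spec_check_string_pattern check_string_pattern check_string_pattern_alt
  simp only []
  set l := s.toList with hl
  set p : Char → Bool := fun ch => ("QRUOPJGDSCB".toList).contains ch with hp
  rw [pv_ctr_eq_countP l ("QRUOPJGDSCB".toList)]
  by_cases h : (PySem.Set.ofList (l.map p)).length ≤ 1
  · rw [if_pos h]
    have := (pv_flags_le_one (l.map p)).mp h
    simp only [List.mem_map] at this
    rw [if_pos ?_]
    by_cases hall : ∀ x ∈ l, p x = true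
    · right
      rw [List.countP_eq_length]
      exact hall
    · left
      rw [List.countP_eq_zero]
      intro a ha
      push Not at hall
      obtain ⟨x, hx, hpx⟩ := hall
      intro hpa
      exact this ⟨⟨a, ha, hpa⟩, ⟨x, hx, by simpa using hpx⟩⟩
  · rw [if_neg h]
    have hb : true ∈ l.map p ∧ false ∈ l.map p := by
      by_contra hc
      exact h ((pv_flags_le_one _).mpr hc)
    simp only [List.mem_map] at hb
    obtain ⟨⟨a, ha, hpa⟩, ⟨b, hbmem, hpb⟩⟩ := hb
    rw [if_neg]
    push Not
    refine ⟨fun h0 => ?_, fun hL => ?_⟩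
    · exact (List.countP_eq_zero.mp h0) a ha hpa
    · have := (List.countP_eq_length.mp hL) b hbmem
      simp_all
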